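-- pv_equiv track=rewrite | github.com/rljt24/exalted_charms | exalted_charms/custom_funtions/value_functions.py | organize_data_per_charm
-- ===== SOURCE A (Python) =====
-- def organize_data_per_charm(list_of_data, beggining_list):
--     list_of_list = []
--     append_list = []
--
--     for index_text, text in enumerate(list_of_data):
--         if text in beggining_list:
--             if not append_list:
--                 append_list.append(text)
--             else:
--                 list_of_list.append(append_list)
--                 append_list = []
--                 append_list.append(text)
--         else:
--             append_list.append(text)
--         if index_text == len(list_of_data)-1:
--             list_of_list.append(append_list)
--
--     return list_of_list
-- ===== SOURCE B (Python) =====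
-- def organize_data_per_charm(list_of_data, beggining_list):
--     # Right-to-left single pass: collect the current group reversed,
--     # close it whenever a marker from beggining_list is reached.
--     result = []
--     open_rev = []  # current group, in reverse order
--     for text in reversed(list_of_data):
--         if text in beggining_list:
--             open_rev.append(text)
--             open_rev.reverse()
--             result.append(open_rev)
--             open_rev = []
--         else:
--             open_rev.append(text)
--     if open_rev:
--         open_rev.reverse()
--         result.append(open_rev)
--     result.reverse()
--     return result
-- ===== Notes on version B (the rewrite author's own statement) =====
-- stated objective: alternative
-- what changed: Replaces A's indexed left-to-right loop with its nested flush logic and last-index check by a single right-to-left pass that prepends to the current group and closes it at each marker, with no index tracking.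
import Mathlib
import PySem

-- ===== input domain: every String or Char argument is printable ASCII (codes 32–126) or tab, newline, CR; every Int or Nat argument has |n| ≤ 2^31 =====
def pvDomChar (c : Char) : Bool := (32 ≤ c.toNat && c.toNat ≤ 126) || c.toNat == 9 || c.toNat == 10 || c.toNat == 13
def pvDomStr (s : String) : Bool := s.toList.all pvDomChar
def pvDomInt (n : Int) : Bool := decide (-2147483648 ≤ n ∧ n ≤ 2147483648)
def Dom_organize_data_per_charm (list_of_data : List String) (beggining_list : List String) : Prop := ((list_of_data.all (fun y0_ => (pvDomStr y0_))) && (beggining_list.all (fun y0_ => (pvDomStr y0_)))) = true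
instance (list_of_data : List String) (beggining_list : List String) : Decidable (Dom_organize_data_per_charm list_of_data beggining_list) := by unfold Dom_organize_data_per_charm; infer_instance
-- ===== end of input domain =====

-- B replaces A's indexed left-to-right loop (with its flush-at-last-index step) by a single
-- right-to-left pass that closes the current group at each marker; objective: alternative.

-- ===== PORT A =====
-- loop body of A: append/flush on the (list_of_list, append_list) state, then the
-- "if index_text == len(list_of_data)-1" final flush
def pvStepA (beggining_list : List String) (n : Int)
    (st : List (List String) × List String) (it : Int × String) :
    List (List String) × List String :=
  let st' :=
    if beggining_list.contains it.2 then
      if st.2 = [] then (st.1, st.2 ++ [it.2])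
      else (st.1 ++ [st.2], ([it.2] : List String))
    else (st.1, st.2 ++ [it.2])
  if it.1 == n - 1 then (st'.1 ++ [st'.2], st'.2) else st'

def organize_data_per_charm (list_of_data : List String) (beggining_list : List String) : List (List String) :=
  let n : Int := list_of_data.length
  ((PySem.List.enumerate list_of_data 0).foldl (pvStepA beggining_list n) ([], [])).1

-- ===== PORT B =====
-- loop body of B, on the state (result, open_rev): close the reversed open group at a
-- marker, otherwise append to it; the loop runs over reversed(list_of_data)
def pvStepBRev (beggining_list : List String)
    (st : List (List String) × List String) (text : String) :
    List (List String) × List String :=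
  if beggining_list.contains text then (st.1 ++ [(st.2 ++ [text]).reverse], ([] : List String))
  else (st.1, st.2 ++ [text])

def organize_data_per_charm_alt (list_of_data : List String) (beggining_list : List String) : List (List String) :=
  let st := list_of_data.reverse.foldl (pvStepBRev beggining_list) ([], [])
  let res := if st.2 = [] then st.1 else st.1 ++ [st.2.reverse]
  res.reverse

-- ===== PRECONDITION & SPEC =====
def Spec_organize_data_per_charm (list_of_data : List String) (beggining_list : List String) (out : List (List String)) : Prop := out = organize_data_per_charm_alt list_of_data beggining_list
instance (list_of_data : List String) (beggining_list : List String) (out : List (List String)) : Decidable (Spec_organize_data_per_charm list_of_data beggining_list out) := by unfold Spec_organize_data_per_charm; infer_instance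

-- ===== CLAIM (what is proved, stated in full; the proofs are below) =====
def Claim_equal_organize_data_per_charm : Prop := ∀ (list_of_data : List String) (beggining_list : List String), Dom_organize_data_per_charm list_of_data beggining_list → Spec_organize_data_per_charm list_of_data beggining_list (organize_data_per_charm list_of_data beggining_list)

-- ===== LEMMAS AND PROOFS =====

-- functional restatement of B's loop step (current group and result in forward order)
def pvStepB (beggining_list : List String) (text : String)
    (st : List String × List (List String)) : List String × List (List String) :=
  if beggining_list.contains text then (([] : List String), (text :: st.1) :: st.2)
  else (text :: st.1, st.2)

-- B's reversed-accumulator fold carries exactly the reverses of the pvStepB foldr state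
theorem pvRevFold (beggining_list : List String) (xs : List String) :
    xs.reverse.foldl (pvStepBRev beggining_list) ([], [])
      = ((xs.foldr (pvStepB beggining_list) ([], [])).2.reverse,
         (xs.foldr (pvStepB beggining_list) ([], [])).1.reverse) := by
  rw [List.foldl_reverse]
  induction xs with
  | nil => simp
  | cons x rest ih =>
    simp only [List.foldr_cons, ih]
    by_cases hx : x ∈ beggining_list <;> simp [pvStepB, pvStepBRev, hx]

-- B's port computes the foldr formulation
theorem pvAltEq (list_of_data beggining_list : List String) :
    organize_data_per_charm_alt list_of_data beggining_list
      = (let st := list_of_data.foldr (pvStepB beggining_list) ([], []);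
         if st.1 = [] then st.2 else st.1 :: st.2) := by
  unfold organize_data_per_charm_alt
  rw [pvRevFold]
  by_cases h : (list_of_data.foldr (pvStepB beggining_list) ([], [])).1 = [] <;> simp [h]

-- index-free version of A's loop body (the final-flush branch never fires before the last element)
def pvStepCore (beggining_list : List String)
    (st : List (List String) × List String) (t : String) :
    List (List String) × List String :=
  if beggining_list.contains t then
    if st.2 = [] then (st.1, st.2 ++ [t])
    else (st.1 ++ [st.2], ([t] : List String))
  else (st.1, st.2 ++ [t])

-- A's indexed fold over a nonempty suffix = index-free fold, then one final flush
theorem pvEnumFold (beggining_list : List String) (n : Int) :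
    ∀ (xs : List String) (k : Int) (st : List (List String) × List String),
      xs ≠ [] → k + xs.length = n →
      (PySem.List.enumerate xs k).foldl (pvStepA beggining_list n) st
        = (let c := xs.foldl (pvStepCore beggining_list) st; (c.1 ++ [c.2], c.2)) := by
  intro xs
  induction xs with
  | nil => intro k st h _; exact absurd rfl h
  | cons x rest ih =>
    intro k st _ hk
    simp only [PySem.List.enumerate_cons, List.foldl_cons]
    cases rest with
    | nil =>
      have hkn : k = n - 1 := by simp at hk; omega
      simp [pvStepA, pvStepCore, hkn]
    | cons y ys =>
      have hkn : ¬ (k == n - 1) = true := by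
        simp only [List.length_cons] at hk; simp only [beq_iff_eq]; omega
      have hstep : pvStepA beggining_list n st (k, x) = pvStepCore beggining_list st x := by
        simp [pvStepA, pvStepCore, hkn]
      rw [hstep]
      exact ih (k + 1) _ (by simp) (by simp at hk ⊢; push_cast at hk ⊢; omega)

-- relating A's left fold (with nonempty current group) to B's right fold
theorem pvCoreFoldr (beggining_list : List String) :
    ∀ (xs : List String) (lol : List (List String)) (al : List String), al ≠ [] →
      (let c := xs.foldl (pvStepCore beggining_list) (lol, al); c.1 ++ [c.2])
        = lol ++ (al ++ (xs.foldr (pvStepB beggining_list) ([], [])).1)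
              :: (xs.foldr (pvStepB beggining_list) ([], [])).2 := by
  intro xs
  induction xs with
  | nil => intro lol al _; simp
  | cons x rest ih =>
    intro lol al hal
    simp only [List.foldl_cons, List.foldr_cons]
    by_cases hx : x ∈ beggining_list
    · have : pvStepCore beggining_list (lol, al) x = (lol ++ [al], [x]) := by
        simp [pvStepCore, hx, hal]
      rw [this, ih _ [x] (by simp)]
      simp [pvStepB, hx]
    · have : pvStepCore beggining_list (lol, al) x = (lol, al ++ [x]) := by
        simp [pvStepCore, hx]
      rw [this, ih _ (al ++ [x]) (by simp)]
      simp [pvStepB, hx]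

-- ===== VERDICT (by name: the statement is the Claim_ definition above) =====
theorem organize_data_per_charm_spec : Claim_equal_organize_data_per_charm := by
  intro data begl _
  show _ = _
  cases data with
  | nil => simp [organize_data_per_charm, pvAltEq, PySem.List.enumerate]
  | cons t rest =>
    rw [pvAltEq]
    show ((PySem.List.enumerate (t :: rest) 0).foldl
            (pvStepA begl ((t :: rest).length : Int)) ([], [])).1
      = (let st := (t :: rest).foldr (pvStepB begl) ([], []);
         if st.1 = [] then st.2 else st.1 :: st.2)
    rw [pvEnumFold begl ((t :: rest).length : Int) (t :: rest) 0 ([], []) (by simp) (by simp)]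
    simp only [List.foldl_cons, List.foldr_cons]
    have h0 : pvStepCore begl ([], []) t = ([], [t]) := by
      by_cases h : t ∈ begl <;> simp [pvStepCore, h]
    rw [h0]
    have := pvCoreFoldr begl rest [] [t] (by simp)
    simp only at this
    rw [this]
    by_cases ht : t ∈ begl <;> simp [pvStepB, ht]
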